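-- pv_equiv track=rewrite | github.com/rednassmets-byte/TT-predictor-streamlit | ai2.py | normalize_kaart
-- ===== SOURCE A (Python) =====
-- def normalize_rank(r):
--     if str(r).startswith("A"):
--         return "A"
--     return r
--
-- def normalize_kaart(kaart_dict):
--     new_dict = {}
--     for k, v in kaart_dict.items():
--         key = normalize_rank(k)   # A1, A9, As3 → "A"
--         if key not in new_dict:
--             new_dict[key] = [0, 0]
--         new_dict[key][0] += v[0]  # wins
--         new_dict[key][1] += v[1]  # losses
--     return new_dict
-- ===== SOURCE B (Python) =====
-- def normalize_rank(r):
--     if str(r).startswith("A"):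
--         return "A"
--     return r
--
-- def normalize_kaart(kaart_dict):
--     groups = {}
--     for k, v in kaart_dict.items():
--         groups.setdefault(normalize_rank(k), []).append(v)
--     return {k: [sum(v[0] for v in vs), sum(v[1] for v in vs)] for k, vs in groups.items()}
-- ===== Notes on version B (the rewrite author's own statement) =====
-- stated objective: alternative
-- what changed: A accumulates running [wins, losses] totals in the result dict with an in-place += per item; B first builds a grouping index (normalized rank -> list of value pairs) in one pass and then maps each group to [sum of firsts, sum of seconds] in a second, differently-shaped pass.
import Mathlib
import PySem

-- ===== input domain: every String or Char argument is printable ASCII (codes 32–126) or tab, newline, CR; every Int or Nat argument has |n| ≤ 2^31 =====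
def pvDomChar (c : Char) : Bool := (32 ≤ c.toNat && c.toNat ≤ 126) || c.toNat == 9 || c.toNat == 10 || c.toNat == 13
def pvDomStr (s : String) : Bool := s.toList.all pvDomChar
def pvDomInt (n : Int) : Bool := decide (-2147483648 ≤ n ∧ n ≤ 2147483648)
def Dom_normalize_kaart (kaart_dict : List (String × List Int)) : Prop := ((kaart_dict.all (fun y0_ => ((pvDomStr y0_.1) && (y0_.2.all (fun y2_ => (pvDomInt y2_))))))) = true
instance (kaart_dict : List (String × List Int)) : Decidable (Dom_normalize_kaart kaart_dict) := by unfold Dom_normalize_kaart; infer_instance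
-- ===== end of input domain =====

-- B replaces A's running in-place accumulation with a group-then-sum decomposition (same cost, different algorithm shape).


-- ===== PORT A =====
-- normalize_rank(r): r is a string here, so str(r) is r itself
def pvRank (r : String) : String := if PySem.Str.startswith r "A" then "A" else r

-- one body of A's loop: the two in-place '+=' mutations are ported as reading the
-- current pair (present by the preceding 'if'; the getD defaults are never used on
-- inputs satisfying Pre_) and re-inserting the updated pair
def pvStepA (d : PySem.Dict String (List Int)) (kv : String × List Int) :
    PySem.Dict String (List Int) :=
  let key := pvRank kv.1
  let d1 := if d.contains key then d else d.insert key [0, 0]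
  let cur := d1.getD key [0, 0]
  d1.insert key [PySem.List.pyGetD cur 0 0 + PySem.List.pyGetD kv.2 0 0,
                 PySem.List.pyGetD cur 1 0 + PySem.List.pyGetD kv.2 1 0]

def normalize_kaart (kaart_dict : List (String × List Int)) : List (String × List Int) :=
  (kaart_dict.foldl pvStepA PySem.Dict.empty).items

-- ===== PORT B =====
-- phase 1 of B: groups.setdefault(normalize_rank(k), []).append(v)
def pvStepB (g : PySem.Dict String (List (List Int))) (kv : String × List Int) :
    PySem.Dict String (List (List Int)) :=
  g.modify (pvRank kv.1) [] (fun vs => vs ++ [kv.2])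

-- phase 2 of B: [sum(v[0] for v in vs), sum(v[1] for v in vs)]
def pvSums (vs : List (List Int)) : List Int :=
  [(vs.map (fun v => PySem.List.pyGetD v 0 0)).sum,
   (vs.map (fun v => PySem.List.pyGetD v 1 0)).sum]

def normalize_kaart_alt (kaart_dict : List (String × List Int)) : List (String × List Int) :=
  ((kaart_dict.foldl pvStepB PySem.Dict.empty).items).map (fun p => (p.1, pvSums p.2))

-- ===== PRECONDITION & SPEC =====
-- Pre_ excludes value lists shorter than 2 (there Python A raises IndexError, and B raises
-- too) and association lists with duplicate keys, which a Python dict cannot represent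
-- (the dict literal collapses them before A ever runs).
def Pre_normalize_kaart (kaart_dict : List (String × List Int)) : Prop :=
  (kaart_dict.map (·.1)).Nodup ∧ ∀ p ∈ kaart_dict, 2 ≤ p.2.length
instance (kaart_dict : List (String × List Int)) : Decidable (Pre_normalize_kaart kaart_dict) := by
  unfold Pre_normalize_kaart; infer_instance

def pvWitness_normalize_kaart : (List (String × List Int)) :=
  [("A1", [1, 2]), ("K", [3, 4])]

def Spec_normalize_kaart (kaart_dict : List (String × List Int)) (out : List (String × List Int)) : Prop := out = normalize_kaart_alt kaart_dict
instance (kaart_dict : List (String × List Int)) (out : List (String × List Int)) : Decidable (Spec_normalize_kaart kaart_dict out) := by unfold Spec_normalize_kaart; infer_instance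

-- ===== CLAIM (what is proved, stated in full; the proofs are below) =====
def Claim_equal_normalize_kaart : Prop := ∀ (kaart_dict : List (String × List Int)), Dom_normalize_kaart kaart_dict → Pre_normalize_kaart kaart_dict → Spec_normalize_kaart kaart_dict (normalize_kaart kaart_dict)

-- ===== LEMMAS AND PROOFS =====

-- the value map relating B's grouping dict to A's accumulator dict
def pvF (p : String × List (List Int)) : String × List Int := (p.1, pvSums p.2)

theorem pvKeys_mapF (g : PySem.Dict String (List (List Int))) :
    (PySem.Dict.mk (g.items.map pvF)).keys = g.keys := by
  simp [PySem.Dict.keys, pvF]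

-- step correspondence: applying A's loop body to the pvF-image of g equals
-- the pvF-image of applying B's phase-1 loop body to g
theorem pvStep_comm (g : PySem.Dict String (List (List Int)))
    (hnd : g.keys.Nodup) (kv : String × List Int) :
    pvStepA (PySem.Dict.mk (g.items.map pvF)) kv =
      PySem.Dict.mk ((pvStepB g kv).items.map pvF) := by
  set key := pvRank kv.1 with hkey
  set dA := PySem.Dict.mk (g.items.map pvF) with hdA
  have hkeys : dA.keys = g.keys := pvKeys_mapF g
  have hndA : dA.keys.Nodup := by rw [hkeys]; exact hnd
  have hcont : dA.contains key = g.contains key := by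
    rw [PySem.Dict.contains_eq_decide_mem_keys, PySem.Dict.contains_eq_decide_mem_keys, hkeys]
  by_cases hc : g.contains key = true
  · -- key present: obtain the stored group vs
    obtain ⟨p, hp, hp1⟩ : ∃ p ∈ g.items, p.1 = key := by
      have : key ∈ g.keys := by
        have := PySem.Dict.contains_eq_decide_mem_keys (ν := List (List Int)) g key
        rw [hc] at this; exact of_decide_eq_true this.symm
      simpa [PySem.Dict.keys, List.mem_map] using this
    obtain ⟨k0, vs⟩ := p
    subst hp1
    have hgetg : g.getD key [] = vs := PySem.Dict.getD_of_mem_items g hp hnd []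
    have hmemA : (key, pvSums vs) ∈ dA.items := by
      rw [hdA]
      exact List.mem_map.mpr ⟨(key, vs), hp, rfl⟩
    have hgetA : dA.getD key [0, 0] = pvSums vs :=
      PySem.Dict.getD_of_mem_items dA hmemA hndA [0, 0]
    have hcA : dA.contains key = true := by rw [hcont]; exact hc
    apply PySem.Dict.ext
    show (pvStepA dA kv).items = _
    simp only [pvStepA, pvStepB, PySem.Dict.modify]
    rw [← hkey, hcA]
    simp only [if_true]
    rw [hgetA, hgetg]
    rw [PySem.Dict.items_insert_of_contains dA _ hcA,
        PySem.Dict.items_insert_of_contains g _ hc]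
    rw [hdA]
    show _ = PySem.Dict.items (PySem.Dict.mk _)
    simp only [List.map_map]
    apply List.map_congr_left
    intro q hq
    by_cases hq1 : q.1 = key
    · simp [Function.comp, pvF, hq1, pvSums, PySem.List.pyGetD]
    · simp [Function.comp, pvF, hq1]
  · have hcf : g.contains key = false := by simpa using hc
    have hcA : dA.contains key = false := by rw [hcont]; exact hcf
    apply PySem.Dict.ext
    show (pvStepA dA kv).items = _
    simp only [pvStepA, pvStepB, PySem.Dict.modify]
    rw [← hkey, hcA]
    simp only [Bool.false_eq_true, if_false]
    rw [PySem.Dict.getD_insert_self, PySem.Dict.getD_of_not_contains g _ hcf]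
    rw [PySem.Dict.insert_insert_self]
    rw [PySem.Dict.items_insert_of_not_contains dA _ hcA,
        PySem.Dict.items_insert_of_not_contains g _ hcf]
    simp [pvF, pvSums, PySem.List.pyGetD, hdA]

-- loop invariant, by induction over the remaining items
theorem pvFold_comm (l : List (String × List Int))
    (g : PySem.Dict String (List (List Int))) (hnd : g.keys.Nodup) :
    (l.foldl pvStepA (PySem.Dict.mk (g.items.map pvF))).items =
      ((l.foldl pvStepB g).items).map pvF := by
  induction l generalizing g with
  | nil => simp
  | cons kv t ih =>
    have hnd' : (pvStepB g kv).keys.Nodup := by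
      unfold pvStepB PySem.Dict.modify
      exact PySem.Dict.nodup_keys_insert _ _ _ hnd
    simp only [List.foldl_cons, pvStep_comm g hnd kv]
    exact ih (pvStepB g kv) hnd'

-- ===== VERDICT (by name: the statement is the Claim_ definition above) =====
theorem normalize_kaart_spec : Claim_equal_normalize_kaart := by
  intro l _ _
  unfold Spec_normalize_kaart normalize_kaart normalize_kaart_alt
  have h := pvFold_comm l PySem.Dict.empty (by simp [PySem.Dict.keys, PySem.Dict.empty])
  simpa [PySem.Dict.empty] using h
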